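-- pv_equiv track=rewrite | github.com/ECUFuzz/ECUFuzz | Fuzzing_engine/spitest/calculate_crc.py | crc3_spi
-- ===== SOURCE A (Python) =====
-- def crc3_spi(data_uint32: int) -> int:
--     # CRC parameters
--     poly = 0b1011  # Polynomial: X^3 + X + 1
--     width = 3
--     init = 0b001  # Initial value
--
--     # Mask to remove the last 5 bits and keep bits 31 to 5
--     mask = 0xFFFFFFE0
--     # Apply mask and shift right to remove last 5 bits
--     data_bin = (data_uint32 & mask) >> 5
--
--     # Convert data to string to use in existing CRC calculation
--     data_str = format(data_bin, '027b') + '001'  # Append zeros as per existing logic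
--
--     # Convert input data to binary
--     data_bin = int(data_str, 2)
--
--     # Main CRC calculation
--     for i in range(len(data_str) - width):
--         # If the leading bit is 1, XOR with polynomial
--         if data_bin & (1 << (len(data_str) - 1 - i)):
--             data_bin ^= poly << (len(data_str) - width - 1 - i)
--
--     # Extract the CRC result
--     crc_result = data_bin & ((1 << width) - 1)
--
--     # Combine the original data (without the last 5 bits) with the CRC result (placed in bits 2 to 4)
--     result = (data_uint32 & 0xFFFFFFE0) | (crc_result << 2)
--
--     return result
-- ===== SOURCE B (Python) =====
-- def crc3_spi(data_uint32: int) -> int: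
--     # Bit-serial 3-bit shift-register CRC (poly x^3+x+1) over the 27 data bits
--     # augmented with the 3-bit pattern 001, instead of string formatting and
--     # wide-integer long division.
--     data_bin = (data_uint32 & 0xFFFFFFE0) >> 5
--     aug = (data_bin << 3) | 0b001
--     crc = 0
--     for i in range(29, -1, -1):
--         crc = (crc << 1) | ((aug >> i) & 1)
--         if crc & 0b1000:
--             crc ^= 0b1011
--     return (data_uint32 & 0xFFFFFFE0) | (crc << 2)
-- ===== Notes on version B (the rewrite author's own statement) =====
-- stated objective: alternative
-- what changed: Replaces A's string formatting, wide-integer parse and long division over a 30-bit augmented integer by a bit-serial 3-bit shift-register CRC that consumes the augmented bits one at a time.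
import Mathlib
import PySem

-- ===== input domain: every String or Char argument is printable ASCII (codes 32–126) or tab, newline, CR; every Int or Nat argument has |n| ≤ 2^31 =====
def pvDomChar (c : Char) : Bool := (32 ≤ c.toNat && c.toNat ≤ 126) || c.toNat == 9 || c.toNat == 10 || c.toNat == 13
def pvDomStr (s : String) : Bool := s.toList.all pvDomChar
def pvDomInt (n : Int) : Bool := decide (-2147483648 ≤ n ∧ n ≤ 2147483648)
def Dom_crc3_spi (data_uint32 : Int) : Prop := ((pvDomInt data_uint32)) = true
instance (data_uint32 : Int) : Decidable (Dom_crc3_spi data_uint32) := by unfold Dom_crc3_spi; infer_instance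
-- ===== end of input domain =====

-- B replaces A's string-building and wide-integer long division with a bit-serial
-- 3-bit shift-register CRC over the same augmented bit stream (objective: alternative).

-- ===== PORT A =====

-- helper: format(n, '027b') etc. — binary, zero-padded to width w, MSB first;
-- exact for 0 ≤ n < 2^w, the only way A uses it (its argument is a 27-bit value).
def pvFormatBinW (n : Nat) : Nat → List Char
  | 0 => []
  | w + 1 => pvFormatBinW (n / 2) w ++ [if n % 2 = 1 then '1' else '0']

-- helper: int(s, 2) — exact for nonempty strings of '0'/'1' digits, the only form A feeds it.
def pvIntOfBin (cs : List Char) : Int :=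
  cs.foldl (fun a c => 2 * a + (if c = '1' then 1 else 0)) (0 : Int)

def crc3_spi (data_uint32 : Int) : Int :=
  let poly : Int := 11          -- 0b1011
  -- init = 0b001 is assigned by A but never used
  let mask : Int := 0xFFFFFFE0
  let data_bin := (PySem.Int.band data_uint32 mask) >>> 5
  -- data_bin is nonnegative here, so .toNat is exact for format
  let data_str : List Char := pvFormatBinW data_bin.toNat 27 ++ ['0', '0', '1']
  let data_bin2 := pvIntOfBin data_str
  let lenS : Int := PySem.List.len data_str
  let db := (PySem.List.pyRange 0 (lenS - 3) 1).foldl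
    (fun db i =>
      -- the shift amounts are nonnegative for every i in the range, so .toNat is exact
      if PySem.Int.band db (1 <<< (lenS - 1 - i).toNat) ≠ 0 then
        PySem.Int.bxor db (poly <<< (lenS - 3 - 1 - i).toNat)
      else db) data_bin2
  let crc_result := PySem.Int.band db ((1 <<< (3 : Nat)) - 1)
  PySem.Int.bor (PySem.Int.band data_uint32 0xFFFFFFE0) (crc_result <<< 2)

-- ===== PORT B =====

def crc3_spi_alt (data_uint32 : Int) : Int :=
  let data_bin := (PySem.Int.band data_uint32 0xFFFFFFE0) >>> 5
  let aug := PySem.Int.bor (data_bin <<< (3 : Nat)) 1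
  let crc := (PySem.List.pyRange 29 (-1) (-1)).foldl
    (fun (crc : Int) (i : Int) =>
      -- i runs 29,…,0, so .toNat is exact
      let c : Int := PySem.Int.bor (crc <<< (1 : Nat)) (PySem.Int.band (aug >>> i.toNat) 1)
      if PySem.Int.band c 8 ≠ 0 then PySem.Int.bxor c 11 else c) (0 : Int)
  PySem.Int.bor (PySem.Int.band data_uint32 0xFFFFFFE0) (crc <<< 2)

-- ===== PRECONDITION & SPEC =====
def Spec_crc3_spi (data_uint32 : Int) (out : Int) : Prop := out = crc3_spi_alt data_uint32
instance (data_uint32 : Int) (out : Int) : Decidable (Spec_crc3_spi data_uint32 out) := by unfold Spec_crc3_spi; infer_instance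

-- ===== CLAIM (what is proved, stated in full; the proofs are below) =====
def Claim_equal_crc3_spi : Prop := ∀ (data_uint32 : Int), Dom_crc3_spi data_uint32 → Spec_crc3_spi data_uint32 (crc3_spi data_uint32)

-- ===== LEMMAS AND PROOFS =====

-- Nat models of the two loops
def fAstep (db i : Nat) : Nat :=
  if db &&& (1 <<< (29 - i)) ≠ 0 then db ^^^ (11 <<< (26 - i)) else db

def fA (aug k : Nat) : Nat := (List.range k).foldl fAstep aug

def fBstep (aug c t : Nat) : Nat :=
  let c' := (c <<< 1) ||| ((aug >>> (29 - t)) &&& 1)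
  if c' &&& 8 ≠ 0 then c' ^^^ 11 else c'

def fB (aug j : Nat) : Nat := (List.range j).foldl (fBstep aug) 0

lemma band_mask_bounds (a : Int) :
    0 ≤ PySem.Int.band a 0xFFFFFFE0 ∧ PySem.Int.band a 0xFFFFFFE0 ≤ 0xFFFFFFE0 := by
  unfold PySem.Int.band
  split_ifs with h1 h2 h2
  · refine ⟨by positivity, ?_⟩
    exact_mod_cast Nat.and_le_right
  · norm_num at h2
  · constructor <;> omega
  · norm_num at h2

lemma and_eight (c : Nat) (h : c < 16) : (c &&& 8 ≠ 0) ↔ 8 ≤ c := by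
  interval_cases c <;> decide

lemma shift_or_bit (c b : Nat) (hb : b < 2) : (c <<< 1) ||| b = 2 * c + b := by
  rw [← Nat.shiftLeft_add_eq_or_of_lt (by simpa using hb), Nat.shiftLeft_eq]
  ring

lemma xor_split (c r t : Nat) (h : r < 2 ^ t) :
    (2 ^ t * c + r) ^^^ (11 <<< t) = 2 ^ t * (c ^^^ 11) + r := by
  apply Nat.eq_of_testBit_eq
  intro j
  simp only [Nat.testBit_xor, Nat.shiftLeft_eq]
  rw [Nat.testBit_two_pow_mul_add _ h, Nat.testBit_two_pow_mul_add _ h]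
  have h11 : (11 * 2 ^ t) = 2 ^ t * 11 + 0 := by ring
  rw [h11, Nat.testBit_two_pow_mul_add _ (by positivity)]
  by_cases hj : j < t <;> simp [hj, Nat.testBit_xor]

lemma pvFormatBinW_length (n w : Nat) : (pvFormatBinW n w).length = w := by
  induction w generalizing n with
  | zero => rfl
  | succ w ih => simp [pvFormatBinW, ih]

lemma pvIntOfBin_format (w : Nat) : ∀ (n : Nat), n < 2 ^ w → ∀ (a : Int),
    (pvFormatBinW n w).foldl (fun a c => 2 * a + (if c = '1' then 1 else 0)) a
      = a * 2 ^ w + n := by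
  induction w with
  | zero => intro n hn a; interval_cases n; simp [pvFormatBinW]
  | succ w ih =>
    intro n hn a
    have hd : n / 2 < 2 ^ w := by omega
    have h2 : n % 2 = 0 ∨ n % 2 = 1 := Nat.mod_two_eq_zero_or_one n
    simp only [pvFormatBinW, List.foldl_append, ih (n / 2) hd a, List.foldl_cons, List.foldl_nil]
    rcases h2 with h2 | h2 <;> simp [h2] <;> ring_nf <;> omega

lemma fA_succ (aug k : Nat) : fA aug (k + 1) = fAstep (fA aug k) k := by
  simp [fA, List.range_succ]

lemma fB_succ (aug j : Nat) : fB aug (j + 1) = fBstep aug (fB aug j) j := by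
  simp [fB, List.range_succ]

lemma fBstep_lt (aug c t : Nat) (h : c < 8) : fBstep aug c t < 8 := by
  unfold fBstep
  have hb : (aug >>> (29 - t)) &&& 1 < 2 := by
    rw [Nat.and_one_is_mod]; omega
  rw [shift_or_bit _ _ hb]
  set b := (aug >>> (29 - t)) &&& 1 with hbdef
  by_cases hc : (2 * c + b) &&& 8 ≠ 0 <;> simp [hc]
  · have h8 : 8 ≤ 2 * c + b := (and_eight _ (by omega)).1 hc
    interval_cases c <;> interval_cases b <;> first | (exfalso; omega) | decide
  · have h8 := (and_eight (2 * c + b) (by omega)).not.1 hc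
    omega

lemma fB_lt (aug j : Nat) : fB aug j < 8 := by
  induction j with
  | zero => simp [fB]
  | succ j ih => rw [fB_succ]; exact fBstep_lt _ _ _ ih

lemma fBstep_small (aug c t : Nat) (hc : c < 4) :
    fBstep aug c t = 2 * c + ((aug >>> (29 - t)) &&& 1) := by
  have hb : (aug >>> (29 - t)) &&& 1 < 2 := by rw [Nat.and_one_is_mod]; omega
  have h0 : ¬ ((2 * c + ((aug >>> (29 - t)) &&& 1)) &&& 8 ≠ 0) := by
    rw [and_eight _ (by omega)]; omega
  simp only [fBstep]
  rw [shift_or_bit _ _ hb, if_neg h0]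

lemma fB_zero (aug : Nat) : fB aug 0 = 0 := rfl

lemma bit_eq (aug i : Nat) : (aug >>> i) &&& 1 = aug / 2 ^ i % 2 := by
  rw [Nat.and_one_is_mod, Nat.shiftRight_eq_div_pow]

lemma fB_three (aug : Nat) (haug : aug < 2 ^ 30) : fB aug 3 = aug / 2 ^ 27 := by
  have h29 : aug / 2 ^ 29 < 2 := by omega
  have h28 : aug / 2 ^ 28 < 4 := by omega
  have d2829 : aug / 2 ^ 28 / 2 = aug / 2 ^ 29 := by norm_num [Nat.div_div_eq_div_mul]
  have d2728 : aug / 2 ^ 27 / 2 = aug / 2 ^ 28 := by norm_num [Nat.div_div_eq_div_mul]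
  have e1 : fB aug 1 = aug / 2 ^ 29 := by
    rw [show (1:Nat) = 0 + 1 from rfl, fB_succ, fB_zero, fBstep_small _ _ _ (by omega), bit_eq]
    omega
  have e2 : fB aug 2 = aug / 2 ^ 28 := by
    rw [show (2:Nat) = 1 + 1 from rfl, fB_succ, e1, fBstep_small _ _ _ (by omega), bit_eq]
    omega
  rw [show (3:Nat) = 2 + 1 from rfl, fB_succ, e2, fBstep_small _ _ _ (by omega), bit_eq]
  omega

lemma main_inv (aug : Nat) (haug : aug < 2 ^ 30) :
    ∀ k, k ≤ 27 → fA aug k = fB aug (k + 3) * 2 ^ (27 - k) + aug % 2 ^ (27 - k) := by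
  intro k
  induction k with
  | zero =>
    intro _
    have hd := Nat.div_add_mod aug (2 ^ 27)
    simpa [fA, fB_three aug haug] using by omega
  | succ k ih =>
    intro hk1
    have hk : k ≤ 26 := by omega
    have IH := ih (by omega)
    set t := 26 - k with ht
    have e1 : 27 - k = t + 1 := by omega
    have e2 : 29 - k = t + 3 := by omega
    have e3 : 27 - (k + 1) = t := by omega
    have e4 : 29 - (k + 3) = t := by omega
    set C := fB aug (k + 3) with hCdef
    have hC : C < 8 := fB_lt aug (k + 3)
    set b := aug / 2 ^ t % 2 with hbdef
    have hb2 : b < 2 := by omega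
    have hr : aug % 2 ^ t < 2 ^ t := Nat.mod_lt _ (by positivity)
    have hmod : aug % 2 ^ (t + 1) = aug % 2 ^ t + 2 ^ t * b := by
      rw [pow_succ, Nat.mod_mul]
    have hX : fA aug k = 2 ^ t * (2 * C + b) + aug % 2 ^ t := by
      rw [IH, e1, hmod]; ring
    have hbit : (aug >>> (29 - (k + 3))) &&& 1 = b := by
      rw [e4, bit_eq]
    rw [fA_succ]
    unfold fAstep
    rw [e2, show 26 - k = t from rfl, hX, Nat.one_shiftLeft,
        Nat.and_two_pow]
    have htb : (2 ^ t * (2 * C + b) + aug % 2 ^ t).testBit (t + 3) = (2 * C + b).testBit 3 := by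
      rw [Nat.testBit_two_pow_mul_add _ hr]
      simp
    rw [htb]
    have hfB : fB aug (k + 1 + 3) = fBstep aug C (k + 3) := by
      rw [show k + 1 + 3 = (k + 3) + 1 from rfl, fB_succ]
    have hc' : (C <<< 1) ||| ((aug >>> (29 - (k + 3))) &&& 1) = 2 * C + b := by
      rw [hbit, shift_or_bit _ _ hb2]
    have hcond : ((2 * C + b) &&& 8 ≠ 0) ↔ (2 * C + b).testBit 3 = true := by
      rw [show (8 : Nat) = 2 ^ 3 from rfl, Nat.and_two_pow]
      cases h : (2 * C + b).testBit 3 <;> simp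
    by_cases h : (2 * C + b).testBit 3 = true
    · rw [if_pos (by simp [h])]
      rw [hfB]
      unfold fBstep
      simp only [hc']
      rw [if_pos (hcond.2 h), e3, xor_split _ _ _ hr]
      ring
    · rw [if_neg (by simp [h])]
      rw [hfB]
      unfold fBstep
      simp only [hc']
      rw [if_neg (fun hne => h (hcond.1 hne)), e3]
      ring

lemma fA_final (aug : Nat) (haug : aug < 2 ^ 30) : fA aug 27 &&& 7 = fB aug 30 := by
  have h := main_inv aug haug 27 (by omega)
  norm_num [Nat.mod_one] at h
  rw [h]
  have h8 := fB_lt aug 30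
  set c := fB aug 30
  interval_cases c <;> decide

lemma pyRange_desc : PySem.List.pyRange 29 (-1) (-1)
    = (List.range 30).map (fun t : Nat => ((29 - t : Nat) : Int)) := by decide

lemma foldB_cast (augN : Nat) : ∀ (ks : List Nat) (c : Nat),
    ((ks.map (fun t : Nat => ((29 - t : Nat) : Int))).foldl
      (fun (crc : Int) (i : Int) =>
        let c : Int := PySem.Int.bor (crc <<< (1 : Nat)) (PySem.Int.band ((augN : Int) >>> i.toNat) 1)
        if PySem.Int.band c 8 ≠ 0 then PySem.Int.bxor c 11 else c) (c : Int))
    = ↑(ks.foldl (fBstep augN) c) := by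
  intro ks
  induction ks with
  | nil => intro c; simp
  | cons x ks ih =>
    intro c
    simp only [List.map_cons, List.foldl_cons]
    have hstep : (if PySem.Int.band (PySem.Int.bor ((c:Int) <<< (1 : Nat)) (PySem.Int.band ((augN:Int) >>> (((29 - x : Nat) : Int)).toNat) 1)) 8 ≠ 0
        then PySem.Int.bxor (PySem.Int.bor ((c:Int) <<< (1 : Nat)) (PySem.Int.band ((augN:Int) >>> (((29 - x : Nat) : Int)).toNat) 1)) 11
        else PySem.Int.bor ((c:Int) <<< (1 : Nat)) (PySem.Int.band ((augN:Int) >>> (((29 - x : Nat) : Int)).toNat) 1))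
        = ((fBstep augN c x : Nat) : Int) := by
      simp only [Int.toNat_natCast, fBstep]
      rw [show ((c : Int) <<< (1:Nat)) = ((c <<< 1 : Nat) : Int) from (Int.natCast_shiftLeft _ _).symm,
          show ((augN : Int) >>> (29 - x)) = ((augN >>> (29 - x) : Nat) : Int) from (Int.natCast_shiftRight _ _).symm,
          show (1 : Int) = ((1 : Nat) : Int) from rfl, PySem.Int.band_natCast,
          PySem.Int.bor_natCast,
          show (8 : Int) = ((8 : Nat) : Int) from rfl, PySem.Int.band_natCast,
          show (11 : Int) = ((11 : Nat) : Int) from rfl, PySem.Int.bxor_natCast]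
      simp only [ne_eq, Nat.cast_eq_zero]
      split_ifs with h <;> simp
    rw [hstep, ih]

lemma portB_eq (data : Int) :
    crc3_spi_alt data = PySem.Int.bor (PySem.Int.band data 0xFFFFFFE0)
      ((↑(fB (8 * ((PySem.Int.band data 0xFFFFFFE0) >>> 5).toNat + 1) 30) : Int) <<< 2) := by
  obtain ⟨h0, h1⟩ := band_mask_bounds data
  set d := PySem.Int.band data 0xFFFFFFE0 with hd
  have hdn : d = ((d.toNat : Nat) : Int) := (Int.toNat_of_nonneg h0).symm
  set m : Nat := (d >>> 5).toNat with hm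
  have hshift : d >>> 5 = ((d.toNat >>> 5 : Nat) : Int) := by
    rw [hdn]; exact (Int.natCast_shiftRight _ _).symm
  have hm' : m = d.toNat >>> 5 := by rw [hm, hshift, Int.toNat_natCast]
  have haug : PySem.Int.bor ((d >>> 5) <<< (3 : Nat)) 1 = ((8 * m + 1 : Nat) : Int) := by
    rw [hshift, ← hm',
        show ((m : Int) <<< (3:Nat)) = ((m <<< 3 : Nat) : Int) from (Int.natCast_shiftLeft _ _).symm,
        show (1 : Int) = ((1 : Nat) : Int) from rfl, PySem.Int.bor_natCast]
    congr 1
    rw [← Nat.shiftLeft_add_eq_or_of_lt (by norm_num : (1:Nat) < 2 ^ 3), Nat.shiftLeft_eq]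
    ring
  show PySem.Int.bor d _ = _
  rw [pyRange_desc, haug]
  have hf := foldB_cast (8 * m + 1) (List.range 30) 0
  rw [Nat.cast_zero] at hf
  rw [hf]
  rfl

lemma pyRangeA : PySem.List.pyRange 0 27 1 = (List.range 27).map (fun k : Nat => (k : Int)) := by
  decide

lemma foldA_cast : ∀ (ks : List Nat), (∀ x ∈ ks, x ≤ 26) → ∀ (dv : Nat),
    ((ks.map (fun k : Nat => (k : Int))).foldl
      (fun db i =>
        if PySem.Int.band db (((1 <<< ((30 : Int) - 1 - i).toNat : Nat) : Int)) ≠ 0 then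
          PySem.Int.bxor db ((11 : Int) <<< ((27 : Int) - 1 - i).toNat)
        else db) (dv : Int))
    = ↑(ks.foldl fAstep dv) := by
  intro ks
  induction ks with
  | nil => intro _ dv; simp
  | cons x ks ih =>
    intro hks dv
    have hx : x ≤ 26 := hks x (by simp)
    have e1 : ((30 : Int) - 1 - (x : Int)).toNat = 29 - x := by omega
    have e2 : ((27 : Int) - 1 - (x : Int)).toNat = 26 - x := by omega
    simp only [List.map_cons, List.foldl_cons]
    have hstep : (if PySem.Int.band (dv : Int) (((1 <<< ((30 : Int) - 1 - (x : Int)).toNat : Nat) : Int)) ≠ 0 then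
          PySem.Int.bxor (dv : Int) ((11 : Int) <<< ((27 : Int) - 1 - (x : Int)).toNat)
        else (dv : Int)) = ((fAstep dv x : Nat) : Int) := by
      rw [e1, e2, fAstep,
          show ((11 : Int) <<< (26 - x)) = ((11 <<< (26 - x) : Nat) : Int) from (Int.natCast_shiftLeft _ _).symm,
          PySem.Int.band_natCast, PySem.Int.bxor_natCast]
      simp only [ne_eq, Nat.cast_eq_zero]
      split_ifs with h <;> simp
    rw [hstep, ih (fun y hy => hks y (by simp [hy]))]

lemma portA_eq (data : Int) :
    crc3_spi data = PySem.Int.bor (PySem.Int.band data 0xFFFFFFE0)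
      ((↑(fA (8 * ((PySem.Int.band data 0xFFFFFFE0) >>> 5).toNat + 1) 27 &&& 7) : Int) <<< 2) := by
  obtain ⟨h0, h1⟩ := band_mask_bounds data
  set d := PySem.Int.band data 0xFFFFFFE0 with hd
  have hdn : d = ((d.toNat : Nat) : Int) := (Int.toNat_of_nonneg h0).symm
  set m : Nat := (d >>> 5).toNat with hm
  have hshift : d >>> 5 = ((d.toNat >>> 5 : Nat) : Int) := by
    rw [hdn]; exact (Int.natCast_shiftRight _ _).symm
  have hm' : m = d.toNat >>> 5 := by rw [hm, hshift, Int.toNat_natCast]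
  have hmlt : m < 2 ^ 27 := by
    have hlt : d.toNat ≤ 0xFFFFFFE0 := by omega
    rw [hm', Nat.shiftRight_eq_div_pow]
    omega
  show PySem.Int.bor d _ = _
  rw [hshift, Int.toNat_natCast, ← hm']
  have hlen : PySem.List.len (pvFormatBinW m 27 ++ ['0', '0', '1']) = (30 : Int) := by
    simp [PySem.List.len_eq, pvFormatBinW_length]
  rw [hlen]
  have hparse : pvIntOfBin (pvFormatBinW m 27 ++ ['0', '0', '1']) = ((8 * m + 1 : Nat) : Int) := by
    unfold pvIntOfBin
    rw [List.foldl_append, pvIntOfBin_format 27 m hmlt 0]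
    norm_num
    push_cast
    ring
  rw [hparse, show (30 : Int) - 3 = 27 from by norm_num]
  rw [pyRangeA, foldA_cast (List.range 27) (by intro x hx; simp at hx; omega)]
  rw [show ((((1 <<< (3:Nat) : Nat)) : Int)) - 1 = ((7 : Nat) : Int) from rfl, PySem.Int.band_natCast]
  rfl

-- ===== VERDICT (by name: the statement is the Claim_ definition above) =====
theorem crc3_spi_spec : Claim_equal_crc3_spi := by
  intro data _
  unfold Spec_crc3_spi
  rw [portA_eq, portB_eq]
  obtain ⟨h0, h1⟩ := band_mask_bounds data
  have hm : ((PySem.Int.band data 0xFFFFFFE0) >>> 5).toNat < 2 ^ 27 := by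
    have hdn : PySem.Int.band data 0xFFFFFFE0 = (((PySem.Int.band data 0xFFFFFFE0).toNat : Nat) : Int) :=
      (Int.toNat_of_nonneg h0).symm
    have hshift : (PySem.Int.band data 0xFFFFFFE0) >>> 5
        = (((PySem.Int.band data 0xFFFFFFE0).toNat >>> 5 : Nat) : Int) := by
      rw [hdn]; exact (Int.natCast_shiftRight _ _).symm
    rw [hshift, Int.toNat_natCast, Nat.shiftRight_eq_div_pow]
    omega
  rw [fA_final _ (by omega)]
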